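-- pv_equiv track=rewrite | github.com/Fondamenti18/fondamenti-di-programmazione | students/1817818/homework02/program03.py | corrisponde
-- ===== SOURCE A (Python) =====
-- def corrisponde(s,codice):
--     corrispondenze = {}
--     corrispondenze[codice[0]] = s[0]
--     corr = True
--     for i in range(1,len(s)):
--         if codice[i] in corrispondenze.keys():
--             if corrispondenze[codice[i]] != s[i]:
--                 corr = False
--         else:
--             if s[i] in corrispondenze.values():
--                 corr = False
--             else:
--                 corrispondenze[codice[i]] = s[i]
--     return corr
-- ===== SOURCE B (Python) =====
-- def corrisponde(s, codice):
--     n = len(s)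
--     return all((codice[i] == codice[j]) == (s[i] == s[j])
--                for j in range(n) for i in range(j))
-- ===== Notes on version B (the rewrite author's own statement) =====
-- stated objective: simpler
-- what changed: Replaced the incremental dict-plus-flag scan by a direct pairwise consistency check: the coding is consistent and bijective iff for every pair of positions i<j, codice[i]==codice[j] exactly when s[i]==s[j].
import Mathlib
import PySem

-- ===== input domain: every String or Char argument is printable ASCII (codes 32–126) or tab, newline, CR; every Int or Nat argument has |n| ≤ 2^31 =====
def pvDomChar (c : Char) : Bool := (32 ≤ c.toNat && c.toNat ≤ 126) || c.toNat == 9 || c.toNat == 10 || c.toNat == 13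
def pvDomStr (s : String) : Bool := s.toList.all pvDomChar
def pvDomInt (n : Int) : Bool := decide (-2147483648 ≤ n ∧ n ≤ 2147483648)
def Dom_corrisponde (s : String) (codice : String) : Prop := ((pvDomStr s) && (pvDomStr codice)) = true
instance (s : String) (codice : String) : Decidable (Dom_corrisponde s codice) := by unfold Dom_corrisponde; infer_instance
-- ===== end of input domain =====

-- B replaces A's incremental dict-and-flag scan by a direct pairwise consistency check (simpler; same O(n^2) cost).

-- ===== PORT A =====
-- Literal port of A's dict-building loop.  Python indexing s[i]/codice[i] is PySem.List.pyGetD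
-- with a default that is unreachable under Pre_ (all indices are in range there);
-- 'codice[i] in corrispondenze.keys()' is key containment, 'corrispondenze[codice[i]]' is the
-- guarded lookup (the key is present on that branch).
def corrisponde (s : String) (codice : String) : Bool :=
  let sl := s.toList
  let cl := codice.toList
  let d0 : PySem.Dict Char Char :=
    (PySem.Dict.empty).insert (PySem.List.pyGetD cl 0 ' ') (PySem.List.pyGetD sl 0 ' ')
  let st := (PySem.List.pyRange 1 (sl.length : Int) 1).foldl
    (fun (st : PySem.Dict Char Char × Bool) i =>
      let ci := PySem.List.pyGetD cl i ' '
      let si := PySem.List.pyGetD sl i ' '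
      if st.1.contains ci then
        if st.1.getD ci ' ' != si then (st.1, false) else st
      else
        if (st.1.values).contains si then (st.1, false)
        else (st.1.insert ci si, st.2))
    (d0, true)
  st.2

-- ===== PORT B =====
-- Port of Source B: all((codice[i]==codice[j]) == (s[i]==s[j]) for j in range(n) for i in range(j)).
def corrisponde_alt (s : String) (codice : String) : Bool :=
  let sl := s.toList
  let cl := codice.toList
  (PySem.List.pyRange 0 (sl.length : Int) 1).all (fun j =>
    (PySem.List.pyRange 0 j 1).all (fun i =>
      (PySem.List.pyGetD cl i ' ' == PySem.List.pyGetD cl j ' ')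
        == (PySem.List.pyGetD sl i ' ' == PySem.List.pyGetD sl j ' ')))

-- ===== PRECONDITION & SPEC =====
-- A raises IndexError when s is empty (s[0]) or codice is shorter than s (codice[i]); Pre_ excludes exactly those inputs.
def Pre_corrisponde (s : String) (codice : String) : Prop :=
  1 ≤ s.toList.length ∧ s.toList.length ≤ codice.toList.length
instance (s : String) (codice : String) : Decidable (Pre_corrisponde s codice) := by
  unfold Pre_corrisponde; infer_instance

def pvWitness_corrisponde : String × String := ("abca", "xzyx")

def Spec_corrisponde (s : String) (codice : String) (out : Bool) : Prop := out = corrisponde_alt s codice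
instance (s : String) (codice : String) (out : Bool) : Decidable (Spec_corrisponde s codice out) := by unfold Spec_corrisponde; infer_instance

-- ===== CLAIM (what is proved, stated in full; the proofs are below) =====
def Claim_equal_corrisponde : Prop := ∀ (s : String) (codice : String), Dom_corrisponde s codice → Pre_corrisponde s codice → Spec_corrisponde s codice (corrisponde s codice)

-- ===== LEMMAS AND PROOFS =====

-- The pairwise-consistency predicate on the first m positions.
def pvP (sl cl : List Char) (m : ℕ) : Prop :=
  ∀ j, j < m → ∀ i, i < j → (cl.getD i ' ' = cl.getD j ' ' ↔ sl.getD i ' ' = sl.getD j ' ')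

-- Indices of first occurrences (in codice) among the first m positions.
def pvFirst (cl : List Char) (m : ℕ) : List ℕ :=
  (List.range m).filter (fun i => decide (∀ j, j < i → cl.getD j ' ' ≠ cl.getD i ' '))

-- A's loop body, with the index as a Nat.
def pvStep (sl cl : List Char) (st : PySem.Dict Char Char × Bool) (j : ℕ) :
    PySem.Dict Char Char × Bool :=
  let cj := cl.getD j ' '
  let tj := sl.getD j ' '
  if st.1.contains cj then
    if st.1.getD cj ' ' != tj then (st.1, false) else st
  else
    if (st.1.values).contains tj then (st.1, false)
    else (st.1.insert cj tj, st.2)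

def pvD0 (sl cl : List Char) : PySem.Dict Char Char :=
  (PySem.Dict.empty).insert (cl.getD 0 ' ') (sl.getD 0 ' ')

def pvLoop (sl cl : List Char) (m : ℕ) : PySem.Dict Char Char × Bool :=
  (List.range m).foldl (fun st k => pvStep sl cl st (k + 1)) (pvD0 sl cl, true)

lemma pvStep_snd_false (sl cl : List Char) (d : PySem.Dict Char Char) (j : ℕ) :
    (pvStep sl cl (d, false) j).2 = false := by
  simp only [pvStep]
  split_ifs <;> rfl

lemma pvP_succ (sl cl : List Char) (m : ℕ) :
    pvP sl cl (m + 1) ↔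
      pvP sl cl m ∧ ∀ i, i < m → (cl.getD i ' ' = cl.getD m ' ' ↔ sl.getD i ' ' = sl.getD m ' ') := by
  constructor
  · intro h
    exact ⟨fun j hj i hi => h j (by omega) i hi, fun i hi => h m (by omega) i hi⟩
  · rintro ⟨h1, h2⟩ j hj i hi
    rcases Nat.lt_succ_iff_lt_or_eq.1 hj with hj' | rfl
    · exact h1 j hj' i hi
    · exact h2 i hi

lemma mem_pvFirst (cl : List Char) (m i : ℕ) :
    i ∈ pvFirst cl m ↔ i < m ∧ ∀ j, j < i → cl.getD j ' ' ≠ cl.getD i ' ' := by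
  simp [pvFirst]

lemma pvFirst_exists (cl : List Char) (m x : ℕ) (hx : x < m) :
    ∃ i ∈ pvFirst cl m, cl.getD i ' ' = cl.getD x ' ' ∧ i ≤ x := by
  classical
  have hP : ∃ i, cl.getD i ' ' = cl.getD x ' ' ∧ i ≤ x := ⟨x, rfl, le_rfl⟩
  obtain ⟨h1, h2⟩ := Nat.find_spec hP
  refine ⟨Nat.find hP, ?_, h1, h2⟩
  rw [mem_pvFirst]
  exact ⟨by omega, fun j hj hcj => Nat.find_min hP hj ⟨hcj.trans h1, by omega⟩⟩

lemma nodup_map_pvFirst (cl : List Char) (m : ℕ) :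
    ((pvFirst cl m).map (fun i => cl.getD i ' ')).Nodup := by
  have hnd : (pvFirst cl m).Nodup := List.nodup_range.filter _
  rw [List.nodup_map_iff_inj_on hnd]
  intro a ha b hb hab
  rw [mem_pvFirst] at ha hb
  by_contra hne
  rcases Nat.lt_or_ge a b with h | h
  · exact hb.2 a h hab
  · exact ha.2 b (by omega) hab.symm

lemma pvFirst_succ (cl : List Char) (m : ℕ) :
    pvFirst cl (m + 1) =
      pvFirst cl m ++ (if ∀ j, j < m → cl.getD j ' ' ≠ cl.getD m ' ' then [m] else []) := by
  simp only [pvFirst, List.range_succ, List.filter_append, List.filter_singleton,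
    Bool.cond_eq_ite, decide_eq_true_eq]

-- main loop characterisation: the flag after processing indices 1..m is the pairwise
-- consistency of the first m+1 positions, and while consistent the dict holds exactly
-- the first-occurrence pairs.
lemma pvLoop_char (sl cl : List Char) (m : ℕ) :
    ((pvLoop sl cl m).2 = true ↔ pvP sl cl (m + 1)) ∧
    (pvP sl cl (m + 1) →
      (pvLoop sl cl m).1.items =
        (pvFirst cl (m + 1)).map (fun i => (cl.getD i ' ', sl.getD i ' '))) := by
  induction m with
  | zero =>
    constructor
    · constructor
      · intro _ j hj i hi; omega
      · intro _; rfl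
    · intro _
      have h1 : pvFirst cl 1 = [0] := by
        simp only [pvFirst, List.range_succ, List.range_zero, List.nil_append,
          List.filter_singleton, Bool.cond_eq_ite, decide_eq_true_eq]
        rw [if_pos (by intro j hj; omega)]
      show (pvD0 sl cl).items = _
      rw [pvD0, PySem.Dict.items_insert_of_not_contains _ _ (PySem.Dict.contains_empty _), h1]
      rfl
  | succ m ih =>
    have hloop : pvLoop sl cl (m + 1) = pvStep sl cl (pvLoop sl cl m) (m + 1) := by
      simp only [pvLoop, List.range_succ, List.foldl_append, List.foldl_cons, List.foldl_nil]
    by_cases hP : pvP sl cl (m + 1)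
    · -- consistent so far
      have hsnd : (pvLoop sl cl m).2 = true := ih.1.mpr hP
      have hitems := ih.2 hP
      have hstate : pvLoop sl cl m = ((pvLoop sl cl m).1, true) := by
        rw [← hsnd]
      set d := (pvLoop sl cl m).1 with hd
      have hkeys : d.keys = (pvFirst cl (m + 1)).map (fun i => cl.getD i ' ') := by
        show d.items.map Prod.fst = _
        rw [hitems, List.map_map]; rfl
      have hvals : d.values = (pvFirst cl (m + 1)).map (fun i => sl.getD i ' ') := by
        show d.items.map Prod.snd = _
        rw [hitems, List.map_map]; rfl
      have hnd : d.keys.Nodup := by rw [hkeys]; exact nodup_map_pvFirst cl (m + 1)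
      have hcont : ∀ x, d.contains x = true ↔ ∃ i, i < m + 1 ∧ cl.getD i ' ' = x := by
        intro x
        rw [PySem.Dict.contains_iff_mem_keys, hkeys, List.mem_map]
        constructor
        · rintro ⟨i, hi, rfl⟩
          exact ⟨i, ((mem_pvFirst cl (m + 1) i).1 hi).1, rfl⟩
        · rintro ⟨i, hi, rfl⟩
          obtain ⟨i0, hi0, hc0, _⟩ := pvFirst_exists cl (m + 1) i hi
          exact ⟨i0, hi0, hc0⟩
      have hget : ∀ i0 ∈ pvFirst cl (m + 1), d.getD (cl.getD i0 ' ') ' ' = sl.getD i0 ' ' := by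
        intro i0 hi0
        refine PySem.Dict.getD_of_mem_items d ?_ hnd ' '
        rw [hitems]
        exact List.mem_map.2 ⟨i0, hi0, rfl⟩
      rw [hloop, hstate]
      by_cases hc : ∃ i, i < m + 1 ∧ cl.getD i ' ' = cl.getD (m + 1) ' '
      · -- the code symbol was seen before; i0 = its first occurrence
        obtain ⟨i, hi, hci⟩ := hc
        obtain ⟨i0, hi0, hc0, hle⟩ := pvFirst_exists cl (m + 1) i hi
        have hi0lt : i0 < m + 1 := ((mem_pvFirst cl (m + 1) i0).1 hi0).1
        have hc0m : cl.getD i0 ' ' = cl.getD (m + 1) ' ' := hc0.trans hci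
        have hcontt : d.contains (cl.getD (m + 1) ' ') = true :=
          (hcont _).2 ⟨i0, hi0lt, hc0m⟩
        have hlook : d.getD (cl.getD (m + 1) ' ') ' ' = sl.getD i0 ' ' := by
          rw [← hc0m]; exact hget i0 hi0
        -- every earlier occurrence of this code symbol carries t i0, under pvP (m+1)
        have hfirstval : ∀ k, k < m + 1 → cl.getD k ' ' = cl.getD (m + 1) ' ' →
            sl.getD k ' ' = sl.getD i0 ' ' := by
          intro k hk hck
          rcases Nat.lt_trichotomy i0 k with h | h | h
          · exact ((hP k hk i0 h).1 (hc0m.trans hck.symm)).symm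
          · rw [h]
          · exact absurd (hck.trans hc0m.symm)
              (((mem_pvFirst cl (m + 1) i0).1 hi0).2 k h)
        have hfirstval' : ∀ k, k < m + 1 → sl.getD k ' ' = sl.getD i0 ' ' →
            cl.getD k ' ' = cl.getD i0 ' ' := by
          intro k hk htk
          rcases Nat.lt_trichotomy i0 k with h | h | h
          · exact ((hP k hk i0 h).2 htk.symm).symm
          · rw [h]
          · exact (hP i0 hi0lt k h).2 htk
        by_cases ht : sl.getD i0 ' ' = sl.getD (m + 1) ' '
        · -- consistent repeat: state unchanged
          have hbne : (d.getD (cl.getD (m + 1) ' ') ' ' != sl.getD (m + 1) ' ') = false := by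
            rw [hlook, ht, bne_self_eq_false]
          have hstep : pvStep sl cl (d, true) (m + 1) = (d, true) := by
            simp only [pvStep, hcontt, hbne]
            simp
          rw [hstep]
          have hP2 : pvP sl cl (m + 2) := by
            rw [pvP_succ]
            refine ⟨hP, fun k hk => ⟨fun hck => (hfirstval k hk hck).trans ht, fun htk => ?_⟩⟩
            exact (hfirstval' k hk (htk.trans ht.symm)).trans hc0m
          constructor
          · simp only [true_iff]; exact hP2
          · intro _
            rw [hitems, pvFirst_succ cl (m + 1),
              if_neg (by push Not; exact ⟨i0, hi0lt, hc0m⟩), List.append_nil]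
        · -- mismatching repeat: flag goes false
          have hbne : (d.getD (cl.getD (m + 1) ' ') ' ' != sl.getD (m + 1) ' ') = true := by
            rw [hlook]
            exact bne_iff_ne.2 ht
          have hstep : pvStep sl cl (d, true) (m + 1) = (d, false) := by
            simp only [pvStep, hcontt, hbne]
            simp
          rw [hstep]
          have hP2 : ¬ pvP sl cl (m + 2) := by
            intro h
            exact ht ((h (m + 1) (by omega) i0 hi0lt).1 hc0m)
          constructor
          · simp only [Bool.false_eq_true, false_iff]; exact hP2
          · intro h; exact absurd h hP2
      · -- new code symbol
        have hcontf : d.contains (cl.getD (m + 1) ' ') = false := by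
          rw [← Bool.not_eq_true, hcont]
          push Not
          intro i hi
          push Not at hc
          exact hc i hi
        by_cases hv : ∃ i, i < m + 1 ∧ sl.getD i ' ' = sl.getD (m + 1) ' '
        · -- but the string symbol was used: flag goes false
          obtain ⟨i, hi, hti⟩ := hv
          obtain ⟨i0, hi0, hc0, hle⟩ := pvFirst_exists cl (m + 1) i hi
          have hi0lt : i0 < m + 1 := ((mem_pvFirst cl (m + 1) i0).1 hi0).1
          have ht0 : sl.getD i0 ' ' = sl.getD i ' ' := by
            rcases Nat.lt_or_ge i0 i with h | h
            · exact (hP i hi i0 h).1 hc0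
            · have h' : i0 = i := by omega
              rw [h']
          have hmem : (d.values).contains (sl.getD (m + 1) ' ') = true := by
            rw [List.contains_iff_mem, hvals, List.mem_map]
            exact ⟨i0, hi0, ht0.trans hti⟩
          have hstep : pvStep sl cl (d, true) (m + 1) = (d, false) := by
            simp only [pvStep, hcontf, hmem]
            simp
          rw [hstep]
          have hP2 : ¬ pvP sl cl (m + 2) := by
            intro h
            push Not at hc
            exact hc i hi ((h (m + 1) (by omega) i hi).2 hti)
          constructor
          · simp only [Bool.false_eq_true, false_iff]; exact hP2
          · intro h; exact absurd h hP2
        · -- fresh pair: inserted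
          have hmemf : (d.values).contains (sl.getD (m + 1) ' ') = false := by
            rw [← Bool.not_eq_true, List.contains_iff_mem, hvals, List.mem_map]
            push Not at hv ⊢
            intro i0 hi0
            exact hv i0 ((mem_pvFirst cl (m + 1) i0).1 hi0).1
          have hstep : pvStep sl cl (d, true) (m + 1)
              = (d.insert (cl.getD (m + 1) ' ') (sl.getD (m + 1) ' '), true) := by
            simp only [pvStep, hcontf, hmemf]
            simp
          rw [hstep]
          push Not at hc hv
          have hP2 : pvP sl cl (m + 2) := by
            rw [pvP_succ]
            exact ⟨hP, fun k hk => iff_of_false (hc k hk) (hv k hk)⟩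
          constructor
          · simp only [true_iff]; exact hP2
          · intro _
            rw [PySem.Dict.items_insert_of_not_contains _ _ hcontf, hitems,
              pvFirst_succ cl (m + 1), if_pos (fun j hj => hc j hj), List.map_append]
            rfl
    · -- already inconsistent: the flag is and stays false
      have hsnd : (pvLoop sl cl m).2 = false := by
        rcases Bool.eq_false_or_eq_true (pvLoop sl cl m).2 with h | h
        · exact absurd (ih.1.mp h) hP
        · exact h
      have hstate : pvLoop sl cl m = ((pvLoop sl cl m).1, false) := by
        rw [← hsnd]
      have hP2 : ¬ pvP sl cl (m + 2) := by
        intro h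
        exact hP ((pvP_succ sl cl (m + 1)).1 h).1
      constructor
      · rw [hloop, hstate, pvStep_snd_false]
        simp only [Bool.false_eq_true, false_iff]
        exact hP2
      · intro h; exact absurd h hP2

lemma corrisponde_eq_loop (s codice : String) (h : 1 ≤ s.toList.length) :
    corrisponde s codice = (pvLoop s.toList codice.toList (s.toList.length - 1)).2 := by
  simp only [corrisponde]
  rw [PySem.List.pyRange_one]
  have hlen : ((s.toList.length : Int) - 1).toNat = s.toList.length - 1 := by omega
  rw [hlen, List.foldl_map]
  simp only [pvLoop, pvD0, pvStep]
  rw [PySem.List.pyGetD_zero, PySem.List.pyGetD_zero]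
  congr 1
  apply PySem.List.foldl_congr_mem
  intro acc k _
  have hcast : (1 : Int) + (k : Int) = ((k + 1 : ℕ) : Int) := by push_cast; ring
  rw [hcast, PySem.List.pyGetD_natCast, PySem.List.pyGetD_natCast]

lemma corrisponde_alt_iff (s codice : String) :
    corrisponde_alt s codice = true ↔ pvP s.toList codice.toList s.toList.length := by
  simp only [corrisponde_alt, List.all_eq_true]
  constructor
  · intro h j hj i hi
    have hb := h (j : Int) (PySem.List.mem_pyRange_one.2 ⟨by omega, by exact_mod_cast hj⟩)
      (i : Int) (PySem.List.mem_pyRange_one.2 ⟨by omega, by exact_mod_cast hi⟩)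
    simp only [PySem.List.pyGetD_natCast, beq_iff_eq] at hb
    rw [Bool.eq_iff_iff] at hb
    simpa using hb
  · intro h j hjm i him
    obtain ⟨hj0, hjn⟩ := PySem.List.mem_pyRange_one.1 hjm
    obtain ⟨hi0, hij⟩ := PySem.List.mem_pyRange_one.1 him
    obtain ⟨j', rfl⟩ := Int.eq_ofNat_of_zero_le hj0
    obtain ⟨i', rfl⟩ := Int.eq_ofNat_of_zero_le hi0
    have hh := h j' (by exact_mod_cast hjn) i' (by exact_mod_cast hij)
    simp only [PySem.List.pyGetD_natCast, beq_iff_eq]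
    rw [Bool.eq_iff_iff]
    simpa using hh

-- ===== VERDICT (by name: the statement is the Claim_ definition above) =====
theorem corrisponde_spec : Claim_equal_corrisponde := by
  intro s codice _ hpre
  unfold Spec_corrisponde
  obtain ⟨h1, _⟩ := hpre
  rw [Bool.eq_iff_iff, corrisponde_eq_loop s codice h1, corrisponde_alt_iff]
  have hch := (pvLoop_char s.toList codice.toList (s.toList.length - 1)).1
  rw [hch]
  have hm : s.toList.length - 1 + 1 = s.toList.length := by omega
  rw [hm]
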